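-- pv_equiv track=rewrite | github.com/ydb-platform/ydb | .github/scripts/github_issue_utils.py | min_area_by_owner_team_from_rows
-- ===== SOURCE A (Python) =====
-- from collections import defaultdict
-- from typing import Dict, List, Optional, Tuple
--
-- def normalize_analytics_area(raw) -> str:
--     """Match YQL ``$normalize``: first two ``/`` segments, else full string; empty → ``area/-``."""
--     if raw is None:
--         return "area/-"
--     s = str(raw).strip()
--     if not s:
--         return "area/-"
--     parts = s.split("/")
--     if len(parts) >= 2:
--         return f"{parts[0]}/{parts[1]}"
--     return s
--
-- def min_area_by_owner_team_from_rows(rows: List[dict]) -> Dict[str, str]: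
--     """Lowercase owner_team → ``MIN(normalize(area))`` lexicographic (same as SQL mart fallback)."""
--     by_ot: Dict[str, List[str]] = defaultdict(list)
--     for r in rows:
--         a, ot = r.get("area"), r.get("owner_team")
--         if not a or not ot:
--             continue
--         by_ot[str(ot).strip().lower()].append(normalize_analytics_area(str(a)))
--     return {k: min(v) for k, v in by_ot.items() if v}
-- ===== SOURCE B (Python) =====
-- def normalize_analytics_area(raw) -> str:
--     """Match YQL ``$normalize``: first two ``/`` segments, else full string; empty → ``area/-``."""
--     if raw is None:
--         return "area/-"
--     s = str(raw).strip()
--     if not s: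
--         return "area/-"
--     parts = s.split("/")
--     if len(parts) >= 2:
--         return f"{parts[0]}/{parts[1]}"
--     return s
--
-- def min_area_by_owner_team_from_rows(rows):
--     """Single pass keeping a running per-team minimum; no intermediate lists, no second phase."""
--     out = {}
--     for r in rows:
--         a, ot = r.get("area"), r.get("owner_team")
--         if not a or not ot:
--             continue
--         k = str(ot).strip().lower()
--         v = normalize_analytics_area(str(a))
--         cur = out.get(k)
--         if cur is None or v < cur:
--             out[k] = v
--     return out
-- ===== Notes on version B (the rewrite author's own statement) =====
-- stated objective: simpler
-- what changed: Replaces the group-into-lists-then-min two-phase defaultdict pipeline with a single pass that maintains a running per-team minimum in one dict, dropping the intermediate lists and the final comprehension/filter.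
import Mathlib
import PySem

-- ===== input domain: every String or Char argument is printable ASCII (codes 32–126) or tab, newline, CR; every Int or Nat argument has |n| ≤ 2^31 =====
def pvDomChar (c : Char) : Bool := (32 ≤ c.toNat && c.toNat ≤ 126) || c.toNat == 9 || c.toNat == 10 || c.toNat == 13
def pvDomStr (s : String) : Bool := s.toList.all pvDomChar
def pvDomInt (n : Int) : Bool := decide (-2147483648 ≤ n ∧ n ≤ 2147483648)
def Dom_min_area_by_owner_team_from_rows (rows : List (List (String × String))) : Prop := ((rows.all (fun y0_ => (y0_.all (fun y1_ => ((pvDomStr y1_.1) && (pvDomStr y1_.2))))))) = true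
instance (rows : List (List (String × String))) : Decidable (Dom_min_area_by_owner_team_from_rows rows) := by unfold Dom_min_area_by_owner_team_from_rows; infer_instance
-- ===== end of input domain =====

-- B replaces A's two-phase group-into-lists-then-min with a single pass keeping a running
-- per-team minimum (objective: simpler — no intermediate lists, no final comprehension).

-- ===== PORT A =====
-- shared helper (both Pythons call it); 'raw is None' branch dropped: both call sites pass str(a)
def normalize_analytics_area (raw : String) : String :=
  let s := PySem.Str.strip raw
  if s = "" then "area/-"
  else
    let parts := (PySem.Str.split? s "/").getD []   -- s.split("/"); sep "/" ≠ "" so split? is some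
    if 2 ≤ parts.length then PySem.Str.join "" [parts.getD 0 "", "/", parts.getD 1 ""]
    else s

-- the body of A's 'for r in rows' loop (defaultdict(list) append)
def pvStepA (d : PySem.Dict String (List String)) (r : List (String × String)) :
    PySem.Dict String (List String) :=
  match (PySem.Dict.mk r).get? "area", (PySem.Dict.mk r).get? "owner_team" with
  | some av, some otv =>
      if av = "" ∨ otv = "" then d
      else d.modify (PySem.Str.lower (PySem.Str.strip otv)) []
             (fun v => v ++ [normalize_analytics_area av])
  | _, _ => d

def min_area_by_owner_team_from_rows (rows : List (List (String × String))) : List (String × String) :=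
  -- '{k: min(v) for k, v in by_ot.items() if v}': by_ot's keys are unique, so the
  -- comprehension is a filter + map over the items in order
  (((rows.foldl pvStepA PySem.Dict.empty).items.filter (fun p => !p.2.isEmpty)).map
    (fun p => (p.1, (PySem.List.min? p.2 (fun x => x)).getD "")))

-- ===== PORT B =====
-- the body of B's loop: running per-key minimum
def pvStepB (out : PySem.Dict String String) (r : List (String × String)) :
    PySem.Dict String String :=
  match (PySem.Dict.mk r).get? "area", (PySem.Dict.mk r).get? "owner_team" with
  | some av, some otv =>
      if av = "" ∨ otv = "" then out
      else
        let k := PySem.Str.lower (PySem.Str.strip otv)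
        let v := normalize_analytics_area av
        match out.get? k with
        | none => out.insert k v
        | some cur => if v < cur then out.insert k v else out
  | _, _ => out

def min_area_by_owner_team_from_rows_alt (rows : List (List (String × String))) : List (String × String) :=
  (rows.foldl pvStepB PySem.Dict.empty).items

-- ===== PRECONDITION & SPEC =====
def Spec_min_area_by_owner_team_from_rows (rows : List (List (String × String))) (out : List (String × String)) : Prop := out = min_area_by_owner_team_from_rows_alt rows
instance (rows : List (List (String × String))) (out : List (String × String)) : Decidable (Spec_min_area_by_owner_team_from_rows rows out) := by unfold Spec_min_area_by_owner_team_from_rows; infer_instance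

-- ===== CLAIM (what is proved, stated in full; the proofs are below) =====
def Claim_equal_min_area_by_owner_team_from_rows : Prop := ∀ (rows : List (List (String × String))), Dom_min_area_by_owner_team_from_rows rows → Spec_min_area_by_owner_team_from_rows rows (min_area_by_owner_team_from_rows rows)

-- ===== LEMMAS AND PROOFS =====

-- invariant linking A's grouping dict to B's running-min dict
def pvInv (g : PySem.Dict String (List String)) (m : PySem.Dict String String) : Prop :=
  g.keys = m.keys ∧ g.keys.Nodup ∧
  ∀ k, g.contains k = true →
    PySem.List.min? (g.getD k []) (fun x => x) = some (m.getD k "")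

theorem pv_min_append (l : List String) (w s : String)
    (h : PySem.List.min? l (fun x => x) = some w) :
    PySem.List.min? (l ++ [s]) (fun x => x) = some (min w s) := by
  cases l with
  | nil => simp [PySem.List.min?] at h
  | cons x t =>
    rw [PySem.List.min?_id_cons] at h
    rw [List.cons_append, PySem.List.min?_id_cons, List.foldl_append]
    simp_all

theorem pvInv_empty : pvInv PySem.Dict.empty PySem.Dict.empty := by
  refine ⟨rfl, by simp [PySem.Dict.keys_empty], ?_⟩
  intro k hk
  simp [PySem.Dict.contains_empty] at hk

theorem pvInv_step (g : PySem.Dict String (List String)) (m : PySem.Dict String String)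
    (r : List (String × String)) (h : pvInv g m) : pvInv (pvStepA g r) (pvStepB m r) := by
  obtain ⟨hkeys, hnd, hmin⟩ := h
  unfold pvStepA pvStepB
  cases ha : (PySem.Dict.mk r).get? "area" with
  | none => exact ⟨hkeys, hnd, hmin⟩
  | some av =>
    cases ho : (PySem.Dict.mk r).get? "owner_team" with
    | none => exact ⟨hkeys, hnd, hmin⟩
    | some otv =>
      by_cases hz : av = "" ∨ otv = ""
      · simp only [if_pos hz]; exact ⟨hkeys, hnd, hmin⟩
      · simp only [if_neg hz]
        set k := PySem.Str.lower (PySem.Str.strip otv) with hk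
        set v := normalize_analytics_area av with hv
        have hcont : g.contains k = m.contains k := by
          rw [PySem.Dict.contains_eq_decide_mem_keys, PySem.Dict.contains_eq_decide_mem_keys, hkeys]
        by_cases hc : g.contains k = true
        · -- key already present in both: A appends, B compares with the running min
          have hmc : m.contains k = true := by rw [← hcont]; exact hc
          have hgk := hmin k hc
          obtain ⟨cur, hg⟩ : ∃ cur, m.get? k = some cur := by
            rw [PySem.Dict.contains_eq_isSome_get?] at hmc
            exact Option.isSome_iff_exists.mp hmc
          have hcurD : m.getD k "" = cur := PySem.Dict.getD_of_get?_eq_some _ _ hg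
          rw [hcurD] at hgk
          simp only [hg]
          refine ⟨?_, ?_, ?_⟩
          · rw [PySem.Dict.keys_modify, PySem.Dict.keys_insert_of_contains _ _ hc]
            split
            · rw [PySem.Dict.keys_insert_of_contains _ _ hmc]; exact hkeys
            · exact hkeys
          · rw [PySem.Dict.keys_modify, PySem.Dict.keys_insert_of_contains _ _ hc]; exact hnd
          · intro k' hk'
            by_cases he : k' = k
            · subst he
              rw [PySem.Dict.getD_modify_self, pv_min_append _ cur v hgk]
              split
              · rename_i hlt
                rw [PySem.Dict.getD_insert_self, min_eq_right (le_of_lt hlt)]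
              · rename_i hnlt
                rw [min_eq_left (le_of_not_gt hnlt), hcurD]
            · have hgc' : g.contains k' = true := by
                rw [PySem.Dict.contains_modify] at hk'
                simpa [he] using hk'
              rw [PySem.Dict.getD_modify, if_neg he]
              split
              · rw [PySem.Dict.getD_insert, if_neg he]; exact hmin k' hgc'
              · exact hmin k' hgc'
        · -- fresh key: both append it at the end
          have hc' : g.contains k = false := by simpa using hc
          have hmc : m.contains k = false := by rw [← hcont]; exact hc'
          have hmget : m.get? k = none := by
            rw [PySem.Dict.contains_eq_isSome_get?] at hmc
            cases hg : m.get? k with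
            | none => rfl
            | some w => rw [hg] at hmc; simp at hmc
          simp only [hmget]
          refine ⟨?_, ?_, ?_⟩
          · rw [PySem.Dict.keys_modify, PySem.Dict.keys_insert_of_not_contains _ _ hc',
               PySem.Dict.keys_insert_of_not_contains _ _ hmc, hkeys]
          · rw [PySem.Dict.keys_modify, PySem.Dict.keys_insert_of_not_contains _ _ hc']
            refine List.nodup_append.mpr ⟨hnd, List.nodup_singleton _, ?_⟩
            intro x hx y hy
            simp only [List.mem_singleton] at hy
            subst hy
            rw [PySem.Dict.contains_eq_decide_mem_keys] at hc'
            simp at hc'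
            exact fun hxe => hc' (hxe ▸ hx)
          · intro k' hk'
            by_cases he : k' = k
            · subst he
              rw [PySem.Dict.getD_modify_self, PySem.Dict.getD_insert_self,
                  PySem.Dict.getD_of_not_contains _ _ hc']
              simp [PySem.List.min?_id_cons]
            · have hgc' : g.contains k' = true := by
                rw [PySem.Dict.contains_modify] at hk'
                simpa [he] using hk'
              rw [PySem.Dict.getD_modify, if_neg he, PySem.Dict.getD_insert, if_neg he]
              exact hmin k' hgc'

theorem pvInv_foldl (rows : List (List (String × String)))
    (g : PySem.Dict String (List String)) (m : PySem.Dict String String) (h : pvInv g m) :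
    pvInv (rows.foldl pvStepA g) (rows.foldl pvStepB m) := by
  induction rows generalizing g m with
  | nil => exact h
  | cons r t ih => exact ih _ _ (pvInv_step g m r h)

-- ===== VERDICT (by name: the statement is the Claim_ definition above) =====
theorem min_area_by_owner_team_from_rows_spec : Claim_equal_min_area_by_owner_team_from_rows := by
  intro rows _
  unfold Spec_min_area_by_owner_team_from_rows
  unfold min_area_by_owner_team_from_rows min_area_by_owner_team_from_rows_alt
  obtain ⟨hkeys, hnd, hmin⟩ := pvInv_foldl rows PySem.Dict.empty PySem.Dict.empty pvInv_empty
  set g := rows.foldl pvStepA PySem.Dict.empty with hg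
  set m := rows.foldl pvStepB PySem.Dict.empty with hm
  have hndm : m.keys.Nodup := hkeys ▸ hnd
  have hfilter : g.items.filter (fun p => !p.2.isEmpty) = g.items := by
    apply List.filter_eq_self.mpr
    intro p hp
    have hget : g.get? p.1 = some p.2 := PySem.Dict.get?_of_mem_items _ hp hnd
    have hc : g.contains p.1 = true := by
      rw [PySem.Dict.contains_eq_isSome_get?, hget]; rfl
    have hm1 := hmin p.1 hc
    rw [PySem.Dict.getD_of_get?_eq_some _ _ hget] at hm1
    have hne : p.2 ≠ [] := by
      intro he; rw [he] at hm1
      simp [PySem.List.min?] at hm1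
    simp [hne]
  rw [hfilter, PySem.Dict.items_eq_map_keys g hnd [], PySem.Dict.items_eq_map_keys m hndm "",
      List.map_map, ← hkeys]
  apply List.map_congr_left
  intro k hkm
  have hc : g.contains k = true := by
    rw [PySem.Dict.contains_eq_decide_mem_keys]; simpa using hkm
  simp only [Function.comp]
  rw [hmin k hc]
  rfl
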